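-- pv_equiv track=rewrite | github.com/benzsevern/goldencheck | goldencheck/models/profile.py | health_score
-- ===== SOURCE A (Python) =====
-- def health_score(
--
--     findings_by_column: dict[str, dict[str, int]] | None = None,
--     errors: int = 0,
--     warnings: int = 0,
-- ) -> tuple[str, int]:
--     """Calculate health score with per-column cap of -20."""
--     if findings_by_column:
--         total_deduction = 0
--         for col_data in findings_by_column.values():
--             col_deduction = (col_data.get("errors", 0) * 10) + (col_data.get("warnings", 0) * 3)
--             total_deduction += min(col_deduction, 20)
--         points = max(100 - total_deduction, 0)
--     else:
--         points = 100 - (errors * 10) - (warnings * 3)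
--         points = max(points, 0)
--
--     if points >= 90:
--         grade = "A"
--     elif points >= 80:
--         grade = "B"
--     elif points >= 70:
--         grade = "C"
--     elif points >= 60:
--         grade = "D"
--     else:
--         grade = "F"
--     return grade, points
-- ===== SOURCE B (Python) =====
-- def health_score(
--     findings_by_column=None,
--     errors=0,
--     warnings=0,
-- ):
--     """Calculate health score with per-column cap of -20."""
--
--     def deduction(cols):
--         # divide-and-conquer sum of capped per-column deductions
--         # (correct by associativity of +; recursion depth O(log n))
--         if not cols:
--             return 0
--         if len(cols) == 1:
--             c = cols[0]
--             return min(c.get("errors", 0) * 10 + c.get("warnings", 0) * 3, 20)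
--         mid = len(cols) // 2
--         return deduction(cols[:mid]) + deduction(cols[mid:])
--
--     if findings_by_column:
--         points = max(100 - deduction(list(findings_by_column.values())), 0)
--     else:
--         points = max(100 - errors * 10 - warnings * 3, 0)
--     for threshold, grade in [(90, "A"), (80, "B"), (70, "C"), (60, "D")]:
--         if points >= threshold:
--             return grade, points
--     return "F", points
-- ===== Notes on version B (the rewrite author's own statement) =====
-- stated objective: alternative
-- what changed: Points are computed by a divide-and-conquer recursion that halves the column list (correct because + is associative) instead of a left-fold accumulator loop, and the grade is found by scanning a data-driven threshold table with early return instead of the five-way if/elif cascade.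
import Mathlib
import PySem

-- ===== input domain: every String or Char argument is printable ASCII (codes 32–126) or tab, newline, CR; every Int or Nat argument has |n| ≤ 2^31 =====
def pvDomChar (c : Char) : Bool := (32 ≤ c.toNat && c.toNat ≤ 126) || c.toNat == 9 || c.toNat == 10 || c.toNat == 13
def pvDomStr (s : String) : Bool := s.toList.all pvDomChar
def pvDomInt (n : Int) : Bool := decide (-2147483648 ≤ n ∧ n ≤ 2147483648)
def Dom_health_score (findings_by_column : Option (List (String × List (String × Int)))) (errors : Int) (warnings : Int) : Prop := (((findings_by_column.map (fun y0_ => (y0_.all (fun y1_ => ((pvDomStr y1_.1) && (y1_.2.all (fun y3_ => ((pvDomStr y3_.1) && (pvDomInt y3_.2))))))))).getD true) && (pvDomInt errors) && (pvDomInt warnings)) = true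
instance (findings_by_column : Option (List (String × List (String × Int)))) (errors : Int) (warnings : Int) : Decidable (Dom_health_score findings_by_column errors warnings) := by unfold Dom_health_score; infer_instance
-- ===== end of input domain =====

-- B computes the deduction by a divide-and-conquer recursion over the column list and the grade by scanning a threshold table (objective: alternative; same cost).

-- ===== PORT A =====
-- .get("errors", 0) on an inner dict (assoc list, first match wins)
def pvColGetD (d : List (String × Int)) (k : String) (dflt : Int) : Int :=
  (PySem.Dict.mk d).getD k dflt

def health_score (findings_by_column : Option (List (String × List (String × Int)))) (errors : Int) (warnings : Int) : String × Int :=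
  let points : Int :=
    match findings_by_column with
    | some cols =>
      if cols ≠ [] then
        -- for col_data in findings_by_column.values(): total_deduction += min(col_deduction, 20)
        let total_deduction :=
          cols.foldl (fun acc col =>
            acc + min (pvColGetD col.2 "errors" 0 * 10 + pvColGetD col.2 "warnings" 0 * 3) 20) 0
        max (100 - total_deduction) 0
      else max (100 - errors * 10 - warnings * 3) 0
    | none => max (100 - errors * 10 - warnings * 3) 0
  let grade : String :=
    if points ≥ 90 then "A"
    else if points ≥ 80 then "B"
    else if points ≥ 70 then "C"
    else if points ≥ 60 then "D"
    else "F"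
  (grade, points)

-- ===== PORT B =====
-- Source B's deduction(cols): divide and conquer over the list of column dicts
-- (cols[:mid] / cols[mid:] with 0 ≤ mid ≤ len are exactly List.take / List.drop)
def pvDed : List (List (String × Int)) → Int
  | [] => 0
  | [c] => min (pvColGetD c "errors" 0 * 10 + pvColGetD c "warnings" 0 * 3) 20
  | a :: b :: t =>
    let cols := a :: b :: t
    let mid := cols.length / 2
    pvDed (cols.take mid) + pvDed (cols.drop mid)
termination_by cols => cols.length
decreasing_by
  · simp [List.length_take]; omega
  · simp; omega

-- Source B's grade loop: first threshold the points reach, else "F"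
def pvGradeLoop : List (Int × String) → Int → String
  | [], _ => "F"
  | (t, g) :: rest, p => if p ≥ t then g else pvGradeLoop rest p

def health_score_alt (findings_by_column : Option (List (String × List (String × Int)))) (errors : Int) (warnings : Int) : String × Int :=
  let points : Int :=
    match findings_by_column with
    | some cols =>
      if cols.isEmpty then max (100 - errors * 10 - warnings * 3) 0
      else max (100 - pvDed (cols.map Prod.snd)) 0
    | none => max (100 - errors * 10 - warnings * 3) 0
  (pvGradeLoop [(90, "A"), (80, "B"), (70, "C"), (60, "D")] points, points)

-- ===== PRECONDITION & SPEC =====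
def Spec_health_score (findings_by_column : Option (List (String × List (String × Int)))) (errors : Int) (warnings : Int) (out : String × Int) : Prop := out = health_score_alt findings_by_column errors warnings
instance (findings_by_column : Option (List (String × List (String × Int)))) (errors : Int) (warnings : Int) (out : String × Int) : Decidable (Spec_health_score findings_by_column errors warnings out) := by unfold Spec_health_score; infer_instance

-- ===== CLAIM (what is proved, stated in full; the proofs are below) =====
def Claim_equal_health_score : Prop := ∀ (findings_by_column : Option (List (String × List (String × Int)))) (errors : Int) (warnings : Int), Dom_health_score findings_by_column errors warnings → Spec_health_score findings_by_column errors warnings (health_score findings_by_column errors warnings)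

-- ===== LEMMAS AND PROOFS =====
def pvDedOne (c : List (String × Int)) : Int :=
  min (pvColGetD c "errors" 0 * 10 + pvColGetD c "warnings" 0 * 3) 20

lemma pvDed_eq_sum (cols : List (List (String × Int))) :
    pvDed cols = (cols.map pvDedOne).sum := by
  induction cols using pvDed.induct with
  | case1 => simp [pvDed]
  | case2 c => simp [pvDed, pvDedOne]
  | case3 a b t cols mid ih1 ih2 =>
    rw [pvDed]
    rw [ih1, ih2, ← List.sum_append, ← List.map_append, List.take_append_drop]

lemma pv_grade_eq (p : Int) :
    (if p ≥ 90 then "A" else if p ≥ 80 then "B" else if p ≥ 70 then "C" else if p ≥ 60 then "D" else "F")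
    = pvGradeLoop [(90, "A"), (80, "B"), (70, "C"), (60, "D")] p := by
  simp [pvGradeLoop]

lemma pv_foldl_eq_sum (cols : List (String × List (String × Int))) :
    cols.foldl (fun acc col =>
      acc + min (pvColGetD col.2 "errors" 0 * 10 + pvColGetD col.2 "warnings" 0 * 3) 20) 0
    = ((cols.map Prod.snd).map pvDedOne).sum := by
  rw [PySem.List.foldl_add, List.map_map]
  simp only [zero_add]
  rfl

-- ===== VERDICT (by name: the statement is the Claim_ definition above) =====
theorem health_score_spec : Claim_equal_health_score := by
  intro fbc errors warnings _
  unfold Spec_health_score health_score health_score_alt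
  cases fbc with
  | none => simp only; rw [pv_grade_eq]
  | some cols =>
    by_cases hc : cols = []
    · subst hc
      simp only [ne_eq, not_true_eq_false, if_false, List.isEmpty_nil, if_true]
      rw [pv_grade_eq]
    · have hB : cols.isEmpty = false := by simpa using hc
      simp only [ne_eq, hc, not_false_eq_true, if_true, hB, Bool.false_eq_true, if_false]
      rw [pv_foldl_eq_sum, ← pvDed_eq_sum, pv_grade_eq]
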